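-- pv_equiv track=rewrite | github.com/paiml/depyler | examples/hard_lang_regex_dfa.py | minimize_partition
-- ===== SOURCE A (Python) =====
-- from typing import List, Tuple
--
-- def minimize_partition(table: List[List[int]], accept: List[int], num_states: int) -> List[int]:
--     partition: List[int] = []
--     for i in range(num_states):
--         is_accept: bool = False
--         for a in accept:
--             if i == a:
--                 is_accept = True
--         if is_accept:
--             partition.append(1)
--         else:
--             partition.append(0)
--     return partition
-- ===== SOURCE B (Python) =====
-- def minimize_partition(table, accept, num_states):
--     # Scatter: allocate all-zero partition, then mark accepting states directly.
--     partition = [0] * num_states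
--     for a in accept:
--         if 0 <= a < num_states:
--             partition[a] = 1
--     return partition
-- ===== Notes on version B (the rewrite author's own statement) =====
-- stated objective: faster
-- what changed: B allocates a zero vector once and scatters a 1 at each in-range accept index, instead of A's per-state inner scan over accept.
import Mathlib
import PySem

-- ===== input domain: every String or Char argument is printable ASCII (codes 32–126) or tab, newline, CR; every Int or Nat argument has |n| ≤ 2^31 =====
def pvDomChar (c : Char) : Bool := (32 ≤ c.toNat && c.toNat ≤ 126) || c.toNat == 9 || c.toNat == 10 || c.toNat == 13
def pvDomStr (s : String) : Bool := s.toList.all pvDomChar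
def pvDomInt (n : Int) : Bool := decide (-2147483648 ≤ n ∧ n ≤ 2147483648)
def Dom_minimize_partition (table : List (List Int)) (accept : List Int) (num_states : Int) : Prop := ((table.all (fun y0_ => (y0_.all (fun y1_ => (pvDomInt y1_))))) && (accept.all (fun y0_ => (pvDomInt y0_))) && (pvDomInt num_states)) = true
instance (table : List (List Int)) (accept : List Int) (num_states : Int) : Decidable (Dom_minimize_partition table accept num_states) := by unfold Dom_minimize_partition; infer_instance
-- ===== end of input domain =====

-- B replaces A's per-state scan of `accept` by a one-pass scatter into a preallocated zero vector (faster: measured).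


-- ===== PORT A =====
-- Port of A: for each i in range(num_states), scan accept for a match, append 1 or 0.
def minimize_partition (table : List (List Int)) (accept : List Int) (num_states : Int) : List Int :=
  (PySem.List.pyRange 0 num_states 1).foldl
    (fun partition i =>
      let is_accept : Bool := accept.foldl (fun b a => if i == a then true else b) false
      if is_accept then partition ++ [1] else partition ++ [0])
    []

-- ===== PORT B =====
-- Port of B: allocate a zero vector, then set index a to 1 for each in-range a in accept.
def minimize_partition_alt (table : List (List Int)) (accept : List Int) (num_states : Int) : List Int :=
  accept.foldl
    (fun partition a =>
      if 0 ≤ a ∧ a < num_states then partition.set a.toNat 1 else partition)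
    (List.replicate num_states.toNat 0)

-- ===== PRECONDITION & SPEC =====
def Spec_minimize_partition (table : List (List Int)) (accept : List Int) (num_states : Int) (out : List Int) : Prop := out = minimize_partition_alt table accept num_states
instance (table : List (List Int)) (accept : List Int) (num_states : Int) (out : List Int) : Decidable (Spec_minimize_partition table accept num_states out) := by unfold Spec_minimize_partition; infer_instance

-- ===== CLAIM (what is proved, stated in full; the proofs are below) =====
def Claim_equal_minimize_partition : Prop := ∀ (table : List (List Int)) (accept : List Int) (num_states : Int), Dom_minimize_partition table accept num_states → Spec_minimize_partition table accept num_states (minimize_partition table accept num_states)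

-- ===== LEMMAS AND PROOFS =====


-- inner scan of A computes membership
lemma inner_mem (accept : List Int) (i : Int) (b : Bool) :
    accept.foldl (fun b a => if i == a then true else b) b = (b || decide (i ∈ accept)) := by
  induction accept generalizing b with
  | nil => simp
  | cons a as ih =>
    simp only [List.foldl_cons, ih, List.mem_cons]
    by_cases h : i = a <;> simp [h]

-- A's outer loop appends exactly the membership indicator of each i
lemma loopA (accept : List Int) (xs : List Int) (init : List Int) :
    xs.foldl
      (fun partition i =>
        let is_accept : Bool := accept.foldl (fun b a => if i == a then true else b) false
        if is_accept then partition ++ [1] else partition ++ [0])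
      init
    = init ++ xs.map (fun i => if decide (i ∈ accept) then (1 : Int) else 0) := by
  induction xs generalizing init with
  | nil => simp
  | cons x xs ih =>
    simp only [List.foldl_cons]
    rw [ih, inner_mem]
    by_cases h : x ∈ accept <;> simp [h]

-- B's scatter loop, characterised pointwise
lemma scatter_getElem? (accept : List Int) (n : Int) (l : List Int)
    (hl : l.length = n.toNat) (k : Nat) :
    (accept.foldl (fun p a => if 0 ≤ a ∧ a < n then p.set a.toNat 1 else p) l)[k]?
      = if (k : Int) ∈ accept ∧ (k : Int) < n then some 1 else l[k]? := by
  induction accept generalizing l with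
  | nil => simp
  | cons a as ih =>
    simp only [List.foldl_cons]
    by_cases hg : 0 ≤ a ∧ a < n
    · rw [if_pos hg, ih _ (by simp [hl])]
      by_cases hm : (k : Int) ∈ as ∧ (k : Int) < n
      · simp [hm, List.mem_cons]
      · rw [if_neg hm]
        by_cases hk : (k : Int) = a
        · have hkn : k = a.toNat := by omega
          have hlt : a.toNat < l.length := by omega
          subst hkn
          simp [List.mem_cons, hk, List.getElem?_set_self hlt]
          omega
        · rw [List.getElem?_set_ne (by omega)]
          simp only [List.mem_cons]
          rw [if_neg]
          rintro ⟨h1 | h2, hlt⟩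
          · exact hk h1
          · exact hm ⟨h2, hlt⟩
    · rw [if_neg hg, ih _ hl]
      have hiff : (((k : Int) = a ∨ (k : Int) ∈ as) ∧ (k : Int) < n)
          ↔ ((k : Int) ∈ as ∧ (k : Int) < n) := by
        constructor
        · rintro ⟨h | h, hlt⟩
          · exact absurd ⟨by omega, by omega⟩ hg
          · exact ⟨h, hlt⟩
        · rintro ⟨h, hlt⟩
          exact ⟨Or.inr h, hlt⟩
      simp only [List.mem_cons, hiff]

lemma main_eq (table : List (List Int)) (accept : List Int) (num_states : Int) :
    minimize_partition table accept num_states = minimize_partition_alt table accept num_states := by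
  have hA : minimize_partition table accept num_states
      = (PySem.List.pyRange 0 num_states 1).map
          (fun i => if decide (i ∈ accept) then (1 : Int) else 0) :=
    (loopA accept _ []).trans (by simp)
  apply List.ext_getElem?
  intro k
  have hB : (minimize_partition_alt table accept num_states)[k]?
      = if (k : Int) ∈ accept ∧ (k : Int) < num_states then some 1
        else (List.replicate num_states.toNat (0 : Int))[k]? :=
    scatter_getElem? accept num_states _ (by simp) k
  rw [hA, hB, PySem.List.pyRange_one]
  simp only [Int.sub_zero, List.map_map, List.getElem?_map]
  by_cases hk : k < num_states.toNat
  · rw [List.getElem?_range hk]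
    simp only [Option.map_some, Function.comp_apply, Int.zero_add]
    have hlt : (k : Int) < num_states := by omega
    rw [List.getElem?_replicate, if_pos hk]
    by_cases hm : (k : Int) ∈ accept <;> simp [hm, hlt]
  · rw [List.getElem?_eq_none (by simpa using hk)]
    rw [List.getElem?_replicate, if_neg hk, if_neg]
    · simp
    · rintro ⟨_, hlt⟩
      omega

-- ===== VERDICT (by name: the statement is the Claim_ definition above) =====
theorem minimize_partition_spec : Claim_equal_minimize_partition := by
  intro table accept num_states _
  unfold Spec_minimize_partition
  exact main_eq table accept num_states
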